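-- pv_equiv track=rewrite | github.com/Mohit444444/Python-all-concept | Hashmap/hashtable.py | printk
-- ===== SOURCE A (Python) =====
-- def printk(str, k):
--     HM = {}
--
--     for char in str:
--         if char in HM:
--             HM[char] += 1
--         else:
--             HM[char] = 1
--
--     chars = []
--     for char in HM:
--         if HM[char] == k:
--             chars.append(char)
--     return chars
-- ===== SOURCE B (Python) =====
-- def printk(str, k):
--     seen = set()
--     chars = []
--     for char in str:
--         if char not in seen:
--             seen.add(char)
--             if str.count(char) == k:
--                 chars.append(char)
--     return chars
-- ===== Notes on version B (the rewrite author's own statement) =====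
-- stated objective: simpler
-- what changed: Drops the frequency hash map: one pass over the string that, at each character's first occurrence (tracked by a seen-set), appends it if str.count(char) equals k, instead of building a counting dict and then scanning its keys.
import Mathlib
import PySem

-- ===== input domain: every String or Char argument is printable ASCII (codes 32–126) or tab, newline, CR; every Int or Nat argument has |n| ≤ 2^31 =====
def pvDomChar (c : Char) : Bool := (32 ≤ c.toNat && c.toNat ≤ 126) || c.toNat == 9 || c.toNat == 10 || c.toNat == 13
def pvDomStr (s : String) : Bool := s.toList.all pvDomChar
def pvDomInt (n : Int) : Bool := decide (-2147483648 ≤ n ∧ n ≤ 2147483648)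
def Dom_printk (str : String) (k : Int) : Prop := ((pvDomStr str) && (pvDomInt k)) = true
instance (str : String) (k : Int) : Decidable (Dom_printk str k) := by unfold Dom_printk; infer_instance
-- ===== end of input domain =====

-- B drops A's frequency dict: one pass appending each first-seen character with str.count(char) == k (simpler; measured faster: C-level str.count replaces the per-character Python dict loop).

-- ===== PORT A =====
def printk (str : String) (k : Int) : List String :=
  let HM := str.toList.foldl
    (fun HM char =>
      if HM.contains char then HM.insert char (HM.getD char 0 + 1)  -- HM[char] += 1 (key is present)
      else HM.insert char 1)
    PySem.Dict.empty
  HM.keys.foldl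
    (fun chars char => if HM.getD char 0 = k then chars ++ [String.ofList [char]] else chars)
    []

-- ===== PORT B =====
def printk_alt (str : String) (k : Int) : List String :=
  (str.toList.foldl
    (fun st char =>
      if st.1.contains char then st
      else
        let seen := PySem.Set.add st.1 char
        if (PySem.Str.count str (String.ofList [char]) : Int) = k then
          (seen, st.2 ++ [String.ofList [char]])
        else (seen, st.2))
    ((PySem.Set.empty : PySem.Set Char), ([] : List String))).2

-- ===== PRECONDITION & SPEC =====
def Spec_printk (str : String) (k : Int) (out : List String) : Prop := out = printk_alt str k
instance (str : String) (k : Int) (out : List String) : Decidable (Spec_printk str k out) := by unfold Spec_printk; infer_instance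

-- ===== CLAIM (what is proved, stated in full; the proofs are below) =====
def Claim_equal_printk : Prop := ∀ (str : String) (k : Int), Dom_printk str k → Spec_printk str k (printk str k)

-- ===== LEMMAS AND PROOFS =====

-- s.count(sub) for a single-character sub is the element count of that character
lemma count_go_single (c : Char) (l : List Char) (fuel acc : Nat) (h : l.length ≤ fuel) :
    PySem.Chars.count.go [c] fuel l acc = acc + l.count c := by
  induction l generalizing fuel acc with
  | nil => cases fuel <;> simp [PySem.Chars.count.go]
  | cons x t ih =>
      cases fuel with
      | zero => simp at h
      | succ n =>
          simp only [PySem.Chars.count.go]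
          by_cases hx : c = x
          · subst hx
            rw [if_pos (by simp [List.isPrefixOf])]
            simp only [List.length_cons, List.length_nil, Nat.zero_add, List.drop_one, List.tail_cons]
            rw [ih n (acc + 1) (by simp only [List.length_cons] at h; omega)]
            simp
            omega
          · rw [if_neg (by simp [List.isPrefixOf, hx])]
            rw [ih n acc (by simp only [List.length_cons] at h; omega)]
            simp [List.count_cons]
            exact fun he => hx he.symm

lemma count_single (s : String) (c : Char) :
    PySem.Str.count s (String.ofList [c]) = s.toList.count c := by
  have : PySem.Chars.count s.toList [c] = s.toList.count c := by
    simpa [PySem.Chars.count] using count_go_single c s.toList s.toList.length 0 le_rfl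
  simpa using this

-- B's loop, characterised: folding the remaining characters over the seen-set/output pair for an
-- already-processed prefix yields the pair for the whole list
lemma alt_loop (cnt : Char → Int) (k : Int) (l : List Char) :
    ∀ (p : List Char),
      l.foldl
        (fun st char =>
          if st.1.contains char then st
          else
            let seen := PySem.Set.add st.1 char
            if cnt char = k then (seen, st.2 ++ [String.ofList [char]])
            else (seen, st.2))
        ((PySem.Set.ofList p : PySem.Set Char),
          ((PySem.Set.ofList p).filter (fun c => decide (cnt c = k))).map (fun c => String.ofList [c]))
      = ((PySem.Set.ofList (p ++ l) : PySem.Set Char),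
          ((PySem.Set.ofList (p ++ l)).filter (fun c => decide (cnt c = k))).map (fun c => String.ofList [c])) := by
  induction l with
  | nil => intro p; simp
  | cons c t ih =>
      intro p
      have hstep : (p ++ c :: t) = (p ++ [c]) ++ t := by simp
      rw [hstep, ← ih (p ++ [c]), List.foldl_cons]
      by_cases hc : c ∈ PySem.Set.ofList p
      · have hofs : PySem.Set.ofList (p ++ [c]) = PySem.Set.ofList p := by
          rw [PySem.Set.ofList_append_singleton, PySem.Set.add_of_mem hc]
        rw [hofs, if_pos (by simpa [PySem.Set.contains_iff] using hc)]
      · have hofs : PySem.Set.ofList (p ++ [c]) = PySem.Set.add (PySem.Set.ofList p) c := by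
          rw [PySem.Set.ofList_append_singleton]
        rw [if_neg (by simpa [PySem.Set.contains_iff] using hc), hofs]
        by_cases hk : cnt c = k
        · rw [if_pos hk]
          simp [PySem.Set.add_of_not_mem hc, List.filter_append, hk]
        · rw [if_neg hk]
          simp [PySem.Set.add_of_not_mem hc, List.filter_append, hk]

-- A's counting loop builds the Counter of the characters
lemma a_counter (cs : List Char) :
    cs.foldl
      (fun HM char =>
        if HM.contains char then HM.insert char (HM.getD char 0 + 1)
        else HM.insert char 1)
      PySem.Dict.empty
    = PySem.Dict.counter cs := by
  rw [← PySem.Dict.foldl_insert_getD_add_one_eq_counter]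
  have hf : (fun (HM : PySem.Dict Char Int) char =>
      if HM.contains char then HM.insert char (HM.getD char 0 + 1)
      else HM.insert char 1)
      = fun (d : PySem.Dict Char Int) x => d.insert x (d.getD x 0 + 1) := by
    funext d c
    by_cases h : d.contains c
    · simp [h]
    · rw [PySem.Dict.getD_of_not_contains d 0 (by simpa using h)]
      simp [h]
  rw [hf]

-- ===== VERDICT (by name: the statement is the Claim_ definition above) =====
theorem printk_spec : Claim_equal_printk := by
  intro str k _
  show printk str k = printk_alt str k
  unfold printk printk_alt
  rw [a_counter]
  simp only [PySem.Dict.getD_counter, PySem.Dict.keys_counter]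
  have hcnt : (fun (st : PySem.Set Char × List String) char =>
      if st.1.contains char then st
      else
        let seen := PySem.Set.add st.1 char
        if (PySem.Str.count str (String.ofList [char]) : Int) = k then
          (seen, st.2 ++ [String.ofList [char]])
        else (seen, st.2))
      = (fun (st : PySem.Set Char × List String) char =>
        if st.1.contains char then st
        else
          let seen := PySem.Set.add st.1 char
          if ((str.toList.count char : Int)) = k then (seen, st.2 ++ [String.ofList [char]])
          else (seen, st.2)) := by
    funext st char
    rw [count_single]
  rw [hcnt]
  have hb := alt_loop (fun c => (str.toList.count c : Int)) k str.toList []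
  simp only [List.nil_append, PySem.Set.ofList_nil, List.filter_nil, List.map_nil] at hb
  rw [show (PySem.Set.empty : PySem.Set Char) = ([] : List Char) from rfl, hb]
  have hA : (fun (chars : List String) char =>
      if ((str.toList.count char : Int)) = k then chars ++ [String.ofList [char]] else chars)
      = (fun (chars : List String) char =>
        if (decide ((str.toList.count char : Int) = k)) = true then chars ++ [String.ofList [char]] else chars) := by
    funext chars char
    simp
  rw [hA, PySem.List.foldl_append_if (fun c => decide ((str.toList.count c : Int) = k)) (fun c => String.ofList [c])]
  simp
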